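-- pv_equiv track=rewrite | github.com/Hari-Hacks/Hari | Python Programmes/ALL FILES/Important Files/MAIN PROJECT FILE/MODIFIED PKG/Encryption/E.py | chrreplace
-- ===== SOURCE A (Python) =====
-- def shulist(t,key):
--     #Function shifts elements of table by specified amount
--
--     for i in range(t):
--         x=key[:len(key)-1]
--         y=key[len(key)-1:]
--         y.extend(x)
--         key=list(y)
--     return key
--
-- def chrreplace(s):
--     #Function replaces all quotes, slashes and brackets
--     #Error raises in SQL server due to the presence of
--     #above characters. Hence they are replaced
--     #Function takes input a string and returns a string
--     #NOTE-THe input is the hash code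
--     l=''
--     s=list(s)
--     ref=[]
--     for i in range(97,123):
--         ref.append(chr(i))
--     #ref is a list contains reference to replace the characters
--     refno=s.count('\\')+s.count('[')+s.count(']')+s.count('(')
--     refno+=s.count(')')+s.count('{')+s.count('}')+s.count('"')
--     refno+=s.count("'")
--     ref=shulist(refno,ref)
--     character=['\\','[',']','(',')','{','}','"',"'",'<','>']
--     #all characters are put into a list
--     for i in range(len(s)):
--         k=s[i]
--         if k in ('\\','[',']','(',')','{','}','"',"'",'<','>'):
--             s[i]=ref[character.index(k)]
--     for i in s:
--         l=l+i
--     #l is the return valu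
--     return l
-- ===== SOURCE B (Python) =====
-- def chrreplace(s):
--     # Closed-form rotation + dict translation table instead of iterative list shifting
--     specials = '\\[](){}"\'<>'
--     r = sum(s.count(c) for c in specials[:9]) % 26
--     table = {c: chr(97 + (i - r) % 26) for i, c in enumerate(specials)}
--     return ''.join(table.get(c, c) for c in s)
-- ===== Notes on version B (the rewrite author's own statement) =====
-- stated objective: simpler
-- what changed: Replaces the refno-step iterative list rotation (shulist) and the per-index in-place replacement loop with list.index lookups by a closed-form modular rotation (chr(97+(i-r)%26) with r = special-count % 26) baked into a translation dict, and a single join over the string.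
import Mathlib
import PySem

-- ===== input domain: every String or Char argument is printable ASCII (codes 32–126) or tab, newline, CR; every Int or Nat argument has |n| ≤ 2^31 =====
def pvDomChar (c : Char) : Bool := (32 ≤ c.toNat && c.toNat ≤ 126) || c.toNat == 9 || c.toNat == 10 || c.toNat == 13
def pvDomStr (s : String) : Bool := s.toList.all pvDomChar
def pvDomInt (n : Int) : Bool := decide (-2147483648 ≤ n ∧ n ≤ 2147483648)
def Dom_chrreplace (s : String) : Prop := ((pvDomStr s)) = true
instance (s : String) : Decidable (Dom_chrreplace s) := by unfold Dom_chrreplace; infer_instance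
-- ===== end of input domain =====

-- B replaces A's iterative refno-step list rotation and per-index in-place replacement
-- by a closed-form modular rotation baked into a translation dict; objective: simpler.

-- ===== PORT A =====
def shulist (t : Int) (key : List Char) : List Char :=
  (PySem.List.pyRange 0 t 1).foldl (fun key _i =>
    let x := PySem.List.slice key none (some ((key.length : Int) - 1))
    let y := PySem.List.slice key (some ((key.length : Int) - 1)) none
    y ++ x) key

def chrreplace (s : String) : String :=
  let sl := s.toList
  let ref : List Char :=
    (PySem.List.pyRange 97 123 1).foldl (fun acc i => acc ++ [Char.ofNat i.toNat]) []
  let refno : Int :=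
    (PySem.List.count sl '\\' : Int) + (PySem.List.count sl '[' : Int)
      + (PySem.List.count sl ']' : Int) + (PySem.List.count sl '(' : Int)
      + (PySem.List.count sl ')' : Int) + (PySem.List.count sl '{' : Int)
      + (PySem.List.count sl '}' : Int) + (PySem.List.count sl '"' : Int)
      + (PySem.List.count sl '\'' : Int)
  let ref := shulist refno ref
  let character : List Char := ['\\','[',']','(',')','{','}','"','\'','<','>']
  let sl := (PySem.List.pyRange 0 (sl.length : Int) 1).foldl (fun l i =>
      let k := PySem.List.pyGetD l i ' '
      if k ∈ character then
        PySem.List.pySetD l i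
          (PySem.List.pyGetD ref (((PySem.List.index? character k).getD 0 : Nat) : Int) ' ')
      else l) sl
  String.ofList (sl.foldl (fun l c => l ++ [c]) [])

-- ===== PORT B =====
def chrreplace_alt (s : String) : String :=
  let specials : List Char := ['\\','[',']','(',')','{','}','"','\'','<','>']
  let r : Int :=
    PySem.Int.mod (((specials.take 9).map (fun c => (PySem.List.count s.toList c : Int))).sum) 26
  let table : PySem.Dict Char Char :=
    PySem.Dict.ofList ((PySem.List.enumerate specials).map
      (fun p => (p.2, Char.ofNat (97 + (PySem.Int.mod (p.1 - r) 26)).toNat)))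
  String.ofList (s.toList.map (fun c => table.getD c c))

-- ===== PRECONDITION & SPEC =====
def Spec_chrreplace (s : String) (out : String) : Prop := out = chrreplace_alt s
instance (s : String) (out : String) : Decidable (Spec_chrreplace s out) := by
  unfold Spec_chrreplace; infer_instance

-- ===== CLAIM (what is proved, stated in full; the proofs are below) =====
def Claim_equal_chrreplace : Prop := ∀ (s : String), Dom_chrreplace s → Spec_chrreplace s (chrreplace s)

-- ===== LEMMAS AND PROOFS =====

def pvAlpha : List Char := "abcdefghijklmnopqrstuvwxyz".toList

def pvRotc (j : Int) : Char := Char.ofNat (97 + (j % 26)).toNat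

def pvRotList (t : Nat) : List Char := (List.range 26).map (fun (i : Nat) => pvRotc ((i : Int) - (t : Int)))

def pvChars : List Char := ['\\','[',']','(',')','{','}','"','\'','<','>']

def pvVal (r : Int) (i : Nat) : Char := Char.ofNat (97 + PySem.Int.mod ((i : Int) - r) 26).toNat

lemma pvRotc_congr {a b : Int} (h : a % 26 = b % 26) : pvRotc a = pvRotc b := by
  unfold pvRotc; rw [h]

lemma pv_shulist_rot (t : Nat) : shulist (t : Int) pvAlpha = pvRotList t := by
  induction t with
  | zero =>
      show shulist 0 pvAlpha = pvRotList 0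
      rw [shulist, PySem.List.pyRange_one_eq_nil (by norm_num)]
      decide
  | succ t ih =>
      have hcast : (((t+1 : Nat)) : Int) = (t : Int) + 1 := by push_cast; ring
      rw [shulist] at ih ⊢
      rw [hcast, PySem.List.pyRange_one_succ_right (by positivity), List.foldl_append, ih]
      simp only [List.foldl_cons, List.foldl_nil]
      have hlen : (((pvRotList t).length : Int)) - 1 = 25 := by simp [pvRotList]
      rw [hlen, PySem.List.slice_to (pvRotList t) (by norm_num), PySem.List.slice_from (pvRotList t) (by norm_num)]
      have hsplit : pvRotList t
          = (List.range 25).map (fun (i : Nat) => pvRotc ((i : Int) - (t : Int))) ++ [pvRotc ((25 : Int) - (t : Int))] := by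
        rw [pvRotList, show (26 : Nat) = 25 + 1 from rfl, List.range_succ, List.map_append]
        norm_num
      rw [hsplit, List.take_left' (by simp), List.drop_left' (by simp), List.singleton_append]
      apply List.ext_getElem
      · simp [pvRotList]
      · intro i h1 h2
        match i with
        | 0 =>
            simp only [List.getElem_cons_zero, pvRotList, List.getElem_map, List.getElem_range]
            exact pvRotc_congr (by omega)
        | (i+1) =>
            simp only [List.getElem_cons_succ, pvRotList, List.getElem_map, List.getElem_range]
            exact pvRotc_congr (by omega)

lemma pv_rot_get (t idx : Nat) (h : idx < 26) (d : Char) :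
    PySem.List.pyGetD (pvRotList t) (idx : Int) d = pvRotc ((idx : Int) - t) := by
  rw [PySem.List.pyGetD_natCast, pvRotList]
  exact PySem.List.getD_map_range _ 26 idx d h

lemma pv_rot_get' (t idx : Nat) (h : idx < 26) :
    PySem.List.pyGetD (pvRotList t) ((idx : Nat) : Int) ' '
      = pvVal (PySem.Int.mod ((t : Int)) 26) idx := by
  rw [pv_rot_get t idx h ' ']
  unfold pvVal
  rw [PySem.Int.mod_eq_emod_of_pos (by norm_num), PySem.Int.mod_eq_emod_of_pos (by norm_num)]
  unfold pvRotc
  congr 2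
  omega

-- the two programs compute the same character translation, pointwise
lemma pv_point (n : Nat) (c : Char) :
    (if c ∈ pvChars then
        PySem.List.pyGetD (pvRotList n) (((PySem.List.index? pvChars c).getD 0 : Nat) : Int) ' '
      else c)
      = (PySem.Dict.ofList ((PySem.List.enumerate pvChars).map
          (fun p => (p.2, Char.ofNat (97 + (PySem.Int.mod (p.1 - PySem.Int.mod ((n : Int)) 26) 26)).toNat)))).getD c c := by
  by_cases hm : c ∈ pvChars
  · rw [if_pos hm]
    fin_cases hm
    · rw [show ((PySem.List.index? pvChars '\\').getD 0) = 0 from by decide,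
          pv_rot_get' n 0 (by norm_num)]
      simp [PySem.Dict.ofList, pvChars, PySem.List.enumerate_cons, PySem.List.enumerate_nil,
            PySem.Dict.getD_insert, pvVal, PySem.Dict.update, List.foldl_cons, List.foldl_nil,
            PySem.Dict.getD_empty]
      congr 1
      omega
    · rw [show ((PySem.List.index? pvChars '[').getD 0) = 1 from by decide,
          pv_rot_get' n 1 (by norm_num)]
      simp [PySem.Dict.ofList, pvChars, PySem.List.enumerate_cons, PySem.List.enumerate_nil,
            PySem.Dict.getD_insert, pvVal, PySem.Dict.update, List.foldl_cons, List.foldl_nil,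
            PySem.Dict.getD_empty]
    · rw [show ((PySem.List.index? pvChars ']').getD 0) = 2 from by decide,
          pv_rot_get' n 2 (by norm_num)]
      simp [PySem.Dict.ofList, pvChars, PySem.List.enumerate_cons, PySem.List.enumerate_nil,
            PySem.Dict.getD_insert, pvVal, PySem.Dict.update, List.foldl_cons, List.foldl_nil,
            PySem.Dict.getD_empty]
    · rw [show ((PySem.List.index? pvChars '(').getD 0) = 3 from by decide,
          pv_rot_get' n 3 (by norm_num)]
      simp [PySem.Dict.ofList, pvChars, PySem.List.enumerate_cons, PySem.List.enumerate_nil,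
            PySem.Dict.getD_insert, pvVal, PySem.Dict.update, List.foldl_cons, List.foldl_nil,
            PySem.Dict.getD_empty]
    · rw [show ((PySem.List.index? pvChars ')').getD 0) = 4 from by decide,
          pv_rot_get' n 4 (by norm_num)]
      simp [PySem.Dict.ofList, pvChars, PySem.List.enumerate_cons, PySem.List.enumerate_nil,
            PySem.Dict.getD_insert, pvVal, PySem.Dict.update, List.foldl_cons, List.foldl_nil,
            PySem.Dict.getD_empty]
    · rw [show ((PySem.List.index? pvChars '{').getD 0) = 5 from by decide,
          pv_rot_get' n 5 (by norm_num)]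
      simp [PySem.Dict.ofList, pvChars, PySem.List.enumerate_cons, PySem.List.enumerate_nil,
            PySem.Dict.getD_insert, pvVal, PySem.Dict.update, List.foldl_cons, List.foldl_nil,
            PySem.Dict.getD_empty]
    · rw [show ((PySem.List.index? pvChars '}').getD 0) = 6 from by decide,
          pv_rot_get' n 6 (by norm_num)]
      simp [PySem.Dict.ofList, pvChars, PySem.List.enumerate_cons, PySem.List.enumerate_nil,
            PySem.Dict.getD_insert, pvVal, PySem.Dict.update, List.foldl_cons, List.foldl_nil,
            PySem.Dict.getD_empty]
    · rw [show ((PySem.List.index? pvChars '"').getD 0) = 7 from by decide,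
          pv_rot_get' n 7 (by norm_num)]
      simp [PySem.Dict.ofList, pvChars, PySem.List.enumerate_cons, PySem.List.enumerate_nil,
            PySem.Dict.getD_insert, pvVal, PySem.Dict.update, List.foldl_cons, List.foldl_nil,
            PySem.Dict.getD_empty]
    · rw [show ((PySem.List.index? pvChars '\'').getD 0) = 8 from by decide,
          pv_rot_get' n 8 (by norm_num)]
      simp [PySem.Dict.ofList, pvChars, PySem.List.enumerate_cons, PySem.List.enumerate_nil,
            PySem.Dict.getD_insert, pvVal, PySem.Dict.update, List.foldl_cons, List.foldl_nil,
            PySem.Dict.getD_empty]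
    · rw [show ((PySem.List.index? pvChars '<').getD 0) = 9 from by decide,
          pv_rot_get' n 9 (by norm_num)]
      simp [PySem.Dict.ofList, pvChars, PySem.List.enumerate_cons, PySem.List.enumerate_nil,
            PySem.Dict.getD_insert, pvVal, PySem.Dict.update, List.foldl_cons, List.foldl_nil,
            PySem.Dict.getD_empty]
    · rw [show ((PySem.List.index? pvChars '>').getD 0) = 10 from by decide,
          pv_rot_get' n 10 (by norm_num)]
      simp [PySem.Dict.ofList, pvChars, PySem.List.enumerate_cons, PySem.List.enumerate_nil,
            PySem.Dict.getD_insert, pvVal, PySem.Dict.update, List.foldl_cons, List.foldl_nil,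
            PySem.Dict.getD_empty]
  · rw [if_neg hm]
    simp only [pvChars, List.mem_cons, List.not_mem_nil, or_false] at hm
    push_neg at hm
    obtain ⟨h1, h2, h3, h4, h5, h6, h7, h8, h9, h10, h11⟩ := hm
    simp [PySem.Dict.ofList, pvChars, PySem.List.enumerate_cons, PySem.List.enumerate_nil,
          PySem.Dict.getD_insert, PySem.Dict.update, List.foldl_cons, List.foldl_nil,
          PySem.Dict.getD_empty, h1, h2, h3, h4, h5, h6, h7, h8, h9, h10, h11]

-- A's replacement loop is a map
lemma pv_loop_map (g : Char → Char) (xs : List Char) :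
    ∀ n : Nat, n ≤ xs.length →
    (PySem.List.pyRange 0 (n : Int) 1).foldl (fun l i =>
        if PySem.List.pyGetD l i ' ' ∈ pvChars then
          PySem.List.pySetD l i (g (PySem.List.pyGetD l i ' ')) else l) xs
      = (xs.take n).map (fun c => if c ∈ pvChars then g c else c) ++ xs.drop n := by
  intro n
  induction n with
  | zero =>
      intro _
      rw [PySem.List.pyRange_one_eq_nil (by norm_num)]
      simp
  | succ n ih =>
      intro hn
      have hn' : n ≤ xs.length := Nat.le_of_succ_le hn
      have hlt : n < xs.length := hn
      rw [show (((n+1 : Nat)) : Int) = (n : Int) + 1 by push_cast; ring,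
          PySem.List.pyRange_one_succ_right (by positivity), List.foldl_append, ih hn']
      simp only [List.foldl_cons, List.foldl_nil]
      have hA : ((xs.take n).map (fun c => if c ∈ pvChars then g c else c)).length = n := by
        simp [hn']
      have hget : PySem.List.pyGetD
          ((xs.take n).map (fun c => if c ∈ pvChars then g c else c) ++ xs.drop n)
          ((n : Nat) : Int) ' ' = xs[n] := by
        rw [PySem.List.pyGetD_natCast, List.getD_eq_getElem?_getD,
            List.getElem?_append_right (by omega), hA]
        simp [hlt]
      rw [hget]
      rw [List.take_add_one, List.getElem?_eq_getElem hlt]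
      by_cases hc : xs[n] ∈ pvChars
      · rw [if_pos hc, PySem.List.pySetD_natCast, List.set_append, hA, if_neg (by omega),
            Nat.sub_self, List.drop_eq_getElem_cons hlt, List.set_cons_zero]
        simp
        rw [List.take_add_one, List.getElem?_map, List.getElem?_eq_getElem hlt]
        simp [hc]
      · rw [if_neg hc, List.drop_eq_getElem_cons hlt]
        simp
        rw [List.take_add_one, List.getElem?_map, List.getElem?_eq_getElem hlt]
        simp [hc]

-- ===== VERDICT (by name: the statement is the Claim_ definition above) =====
set_option maxHeartbeats 2000000 in
theorem chrreplace_spec : Claim_equal_chrreplace := by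
  intro s _
  show chrreplace s = chrreplace_alt s
  simp only [chrreplace, chrreplace_alt]
  rw [show (['\\','[',']','(',')','{','}','"','\'','<','>'] : List Char) = pvChars from rfl]
  rw [show (List.foldl (fun acc i => acc ++ [Char.ofNat i.toNat]) []
        (PySem.List.pyRange 97 123 1)) = pvAlpha from by decide]
  rw [show List.take 9 pvChars = ['\\','[',']','(',')','{','}','"','\''] from rfl]
  have hsum9 : (List.map (fun c => ((PySem.List.count s.toList c : Nat) : Int))
        (['\\','[',']','(',')','{','}','"','\''] : List Char)).sum
      = (↑(PySem.List.count s.toList '\\') + ↑(PySem.List.count s.toList '[') + ↑(PySem.List.count s.toList ']') + ↑(PySem.List.count s.toList '(') + ↑(PySem.List.count s.toList ')') + ↑(PySem.List.count s.toList '{') + ↑(PySem.List.count s.toList '}') + ↑(PySem.List.count s.toList '"') + ↑(PySem.List.count s.toList '\'') : Int) := by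
    simp only [List.map_cons, List.map_nil, List.sum_cons, List.sum_nil]
    ring
  rw [hsum9]
  obtain ⟨N, hNE⟩ : ∃ N : Nat, (↑(PySem.List.count s.toList '\\') + ↑(PySem.List.count s.toList '[') + ↑(PySem.List.count s.toList ']') + ↑(PySem.List.count s.toList '(') + ↑(PySem.List.count s.toList ')') + ↑(PySem.List.count s.toList '{') + ↑(PySem.List.count s.toList '}') + ↑(PySem.List.count s.toList '"') + ↑(PySem.List.count s.toList '\'') : Int) = (N : Int) :=
    ⟨PySem.List.count s.toList '\\' + PySem.List.count s.toList '[' + PySem.List.count s.toList ']' + PySem.List.count s.toList '(' + PySem.List.count s.toList ')' + PySem.List.count s.toList '{' + PySem.List.count s.toList '}' + PySem.List.count s.toList '"' + PySem.List.count s.toList '\'', by push_cast; ring⟩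
  rw [hNE, pv_shulist_rot N]
  rw [pv_loop_map (fun c => PySem.List.pyGetD (pvRotList N)
        (((PySem.List.index? pvChars c).getD 0 : Nat) : Int) ' ') s.toList
      s.toList.length (le_refl _)]
  simp only [List.take_length, List.drop_length, List.append_nil]
  rw [PySem.List.foldl_append_singleton_eq_self]
  simp only [List.nil_append]
  refine congrArg String.ofList ?_
  exact List.map_congr_left (fun c _ => pv_point N c)
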